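-- pv_equiv track=rewrite | github.com/willdoliver/TCC | Analises/agrupCat.py | calc_reaparicao
-- ===== SOURCE A (Python) =====
-- def calc_reaparicao(mayor):
-- 	size = len(mayor)
--
-- 	mayors = []
-- 	for may in mayor:
-- 		mayors.append(int(may))
--
-- 	resultado = 0
--
-- 	if size < 2 :
-- 		return 0
--
-- 	try:
-- 		# Percorre lista de prefeitos
-- 		for i,v in enumerate(mayors):
-- 			if ( mayors[i] != mayors[i+1] and mayors[i:].count(mayors[i]) > 1):
-- 				resultado += 1
-- 	except:
-- 		return resultado
-- ===== SOURCE B (Python) =====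
-- def calc_reaparicao(mayor):
--     vals = [int(x) for x in mayor]
--     seen = set()
--     succ = None
--     resultado = 0
--     for v in reversed(vals):
--         if succ is not None and v != succ and v in seen:
--             resultado += 1
--         seen.add(v)
--         succ = v
--     return resultado
-- ===== Notes on version B (the rewrite author's own statement) =====
-- stated objective: faster
-- what changed: Replaced A's per-index suffix count mayors[i:].count(...) (and its try/except index loop) by a single right-to-left pass over reversed(vals) that tracks the successor element and a set of already-seen later values, so each reappearance test is an O(1) set lookup.
import Mathlib
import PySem

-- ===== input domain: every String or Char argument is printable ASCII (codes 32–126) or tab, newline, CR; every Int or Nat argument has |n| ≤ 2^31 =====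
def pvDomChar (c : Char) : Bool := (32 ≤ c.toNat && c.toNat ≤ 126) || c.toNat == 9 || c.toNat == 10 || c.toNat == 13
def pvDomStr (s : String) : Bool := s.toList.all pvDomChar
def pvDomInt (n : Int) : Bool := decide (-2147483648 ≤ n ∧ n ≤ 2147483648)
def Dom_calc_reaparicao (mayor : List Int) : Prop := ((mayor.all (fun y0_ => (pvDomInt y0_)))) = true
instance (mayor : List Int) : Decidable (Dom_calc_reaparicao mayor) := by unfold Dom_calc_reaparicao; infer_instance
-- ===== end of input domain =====

-- B replaces A's quadratic per-index suffix count by one right-to-left pass with a seen-set (objective: faster).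

-- ===== PORT A =====
-- A's try/except loop: iterate i = 0,1,2,…; the IndexError from mayors[i+1] (or, defensively,
-- mayors[i]) ends the loop and returns the accumulator.  fuel = size bounds the recursion; the
-- IndexError branch always fires before fuel runs out.
def calcALoop (mayors : List Int) : Nat → Nat → Int → Int
  | 0, _, acc => acc
  | fuel + 1, i, acc =>
    match PySem.List.pyGet? mayors (i : Int), PySem.List.pyGet? mayors ((i : Int) + 1) with
    | some vi, some vnext =>
        calcALoop mayors fuel (i + 1)
          (if vi ≠ vnext ∧ 1 < PySem.List.count (PySem.List.slice mayors (some (i : Int)) none) vi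
           then acc + 1 else acc)
    | _, _ => acc

def calc_reaparicao (mayor : List Int) : Int :=
  let size := mayor.length
  let mayors := mayor.map (fun may => may)   -- int(may) on an int is the identity
  if size < 2 then 0
  else calcALoop mayors size 0 0

-- ===== PORT B =====
-- one step of B's loop body: state = (seen, succ, resultado)
def calcBStep (st : PySem.Set Int × Option Int × Int) (v : Int) : PySem.Set Int × Option Int × Int :=
  let res := match st.2.1 with
    | some succ => if v ≠ succ ∧ st.1.contains v then st.2.2 + 1 else st.2.2
    | none => st.2.2
  (st.1.add v, some v, res)

def calc_reaparicao_alt (mayor : List Int) : Int :=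
  let vals := mayor.map (fun x => x)
  (vals.reverse.foldl calcBStep (PySem.Set.empty, none, 0)).2.2

-- ===== PRECONDITION & SPEC =====
def Spec_calc_reaparicao (mayor : List Int) (out : Int) : Prop := out = calc_reaparicao_alt mayor
instance (mayor : List Int) (out : Int) : Decidable (Spec_calc_reaparicao mayor out) := by unfold Spec_calc_reaparicao; infer_instance

-- ===== CLAIM (what is proved, stated in full; the proofs are below) =====
def Claim_equal_calc_reaparicao : Prop := ∀ (mayor : List Int), Dom_calc_reaparicao mayor → Spec_calc_reaparicao mayor (calc_reaparicao mayor)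

-- ===== LEMMAS AND PROOFS =====

/-- Common characterisation: number of positions whose value differs from its successor and
reappears strictly later. -/
def cnt : List Int → Int
  | a :: b :: t => (if a ≠ b ∧ a ∈ b :: t then 1 else 0) + cnt (b :: t)
  | _ => 0

@[simp] lemma cnt_nil : cnt [] = 0 := rfl
@[simp] lemma cnt_single (a : Int) : cnt [a] = 0 := rfl

lemma cnt_cons_cons (a b : Int) (t : List Int) :
    cnt (a :: b :: t) = (if a ≠ b ∧ a ∈ b :: t then 1 else 0) + cnt (b :: t) := rfl

-- A-side: the loop from index i adds cnt of the suffix.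
lemma calcALoop_drop (mayors : List Int) (fuel i : Nat) (acc : Int)
    (hf : mayors.length ≤ fuel + i) :
    calcALoop mayors fuel i acc = acc + cnt (mayors.drop i) := by
  induction fuel generalizing i acc with
  | zero =>
    have : mayors.drop i = [] := List.drop_eq_nil_of_le (by omega)
    simp [calcALoop, this]
  | succ fuel ih =>
    rcases hd : mayors.drop i with _ | ⟨a, t⟩
    · have hlen : mayors.length ≤ i := List.drop_eq_nil_iff.mp hd
      have h1 : PySem.List.pyGet? mayors (i : Int) = none := by
        rw [PySem.List.pyGet?_natCast]
        exact List.getElem?_eq_none hlen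
      simp [calcALoop, h1]
    · rcases t with _ | ⟨b, t'⟩
      · -- suffix of length 1: mayors[i+1] raises IndexError
        have hlen : mayors.length = i + 1 := by
          have := congrArg List.length hd
          simp [List.length_drop] at this; omega
        have h2 : PySem.List.pyGet? mayors ((i : Int) + 1) = none := by
          have := PySem.List.pyGet?_natCast mayors (i + 1)
          push_cast at this
          rw [this]
          exact List.getElem?_eq_none (by omega)
        simp only [calcALoop, h2]
        rcases PySem.List.pyGet? mayors (i : Int) with _ | vi <;> simp
      · -- at least two elements in the suffix: both gets succeed
        have hlen : t'.length + 2 = mayors.length - i ∧ i ≤ mayors.length := by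
          have := congrArg List.length hd
          simp [List.length_drop] at this
          omega
        have ha : mayors[i]? = some a := by
          have h0 : (mayors.drop i)[0]? = some a := by simp [hd]
          simpa [List.getElem?_drop] using h0
        have hb : mayors[i+1]? = some b := by
          have h0 : (mayors.drop i)[1]? = some b := by simp [hd]
          simpa [List.getElem?_drop] using h0
        have h1 : PySem.List.pyGet? mayors (i : Int) = some a := by
          rw [PySem.List.pyGet?_natCast, ha]
        have h2 : PySem.List.pyGet? mayors ((i : Int) + 1) = some b := by
          have := PySem.List.pyGet?_natCast mayors (i + 1)
          push_cast at this
          rw [this, hb]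
        have hslice : PySem.List.slice mayors (some (i : Int)) none = a :: b :: t' := by
          rw [PySem.List.slice_from_natCast, hd]
        have hcount : (1 < PySem.List.count (a :: b :: t') a) ↔ a ∈ b :: t' := by
          rw [PySem.List.count_eq, List.count_cons_self]
          constructor
          · intro h
            exact List.count_pos_iff.mp (by omega)
          · intro h
            have := List.count_pos_iff.mpr h
            omega
        have hdrop1 : mayors.drop (i + 1) = b :: t' := by
          have h0 : (mayors.drop i).drop 1 = mayors.drop (i + 1) := by
            rw [List.drop_drop]
          rw [← h0, hd]; rfl
        simp only [calcALoop, h1, h2, hslice]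
        rw [ih (i + 1) _ (by omega), hdrop1, cnt_cons_cons]
        by_cases hc : a ≠ b ∧ a ∈ b :: t'
        · rw [if_pos ⟨hc.1, hcount.mpr hc.2⟩, if_pos hc]; ring
        · have hn : ¬ (a ≠ b ∧ 1 < PySem.List.count (a :: b :: t') a) := by
            intro ⟨h1', h2'⟩; exact hc ⟨h1', hcount.mp h2'⟩
          rw [if_neg hn, if_neg hc]; ring

lemma calcA_eq_cnt (mayor : List Int) : calc_reaparicao mayor = cnt mayor := by
  unfold calc_reaparicao
  simp only [List.map_id']
  by_cases h : mayor.length < 2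
  · rw [if_pos h]
    rcases mayor with _ | ⟨a, _ | ⟨b, t⟩⟩ <;> simp at h ⊢
  · rw [if_neg h, calcALoop_drop mayor mayor.length 0 0 (by omega)]
    simp

-- B-side invariant for the fold over the reversed list.
lemma calcB_fold (xs : List Int) :
    xs.reverse.foldl calcBStep (PySem.Set.empty, none, 0) =
      (PySem.Set.ofList xs.reverse, xs.head?, cnt xs) := by
  induction xs with
  | nil => rfl
  | cons a xs ih =>
    have hrev : (a :: xs).reverse = xs.reverse ++ [a] := by simp
    rw [hrev, List.foldl_append, ih]
    have hset : (PySem.Set.ofList xs.reverse).add a =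
        PySem.Set.ofList (xs.reverse ++ [a]) := by
      rw [PySem.Set.ofList_eq_foldl, PySem.Set.ofList_eq_foldl, List.foldl_append]
      rfl
    rcases xs with _ | ⟨b, t⟩
    · rfl
    · have hcontains : ((PySem.Set.ofList (b :: t).reverse).contains a = true) ↔ a ∈ b :: t := by
        rw [PySem.Set.contains_iff, PySem.Set.mem_ofList, List.mem_reverse]
      simp only [List.foldl_cons, List.foldl_nil, calcBStep, List.head?, cnt_cons_cons]
      by_cases hc : a ≠ b ∧ a ∈ b :: t
      · rw [if_pos ⟨hc.1, hcontains.mpr hc.2⟩, if_pos hc, hset]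
        simp; ring
      · have hn : ¬ (a ≠ b ∧ (PySem.Set.ofList (b :: t).reverse).contains a = true) := by
          intro ⟨h1, h2⟩; exact hc ⟨h1, hcontains.mp h2⟩
        rw [if_neg hn, if_neg hc, hset]
        simp

lemma calcB_eq_cnt (mayor : List Int) : calc_reaparicao_alt mayor = cnt mayor := by
  unfold calc_reaparicao_alt
  simp only [List.map_id']
  rw [calcB_fold]

-- ===== VERDICT (by name: the statement is the Claim_ definition above) =====
theorem calc_reaparicao_spec : Claim_equal_calc_reaparicao := by
  intro mayor _
  unfold Spec_calc_reaparicao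
  rw [calcA_eq_cnt, calcB_eq_cnt]
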